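-- pv_equiv track=rewrite | github.com/Bhavana-04/Day-0 | Flipkart-Contest1/rearrange_the_digits.py | smallestnum
-- ===== SOURCE A (Python) =====
-- def smallestnum (N):
--     # code here
--     if(len(N)==1):
--         return N
--     l=[]
--     c=0
--     for i in range(0,len(N)):
--         if(N[i]=='0'):
--             c+=1
--         else:
--             l.append(N[i])
--     l.sort()
--     s=l[0]
--     s=s+(c*'0')
--     for i in range(1,len(l)):
--         s+=l[i]
--     return s
-- ===== SOURCE B (Python) =====
-- def smallestnum(N):
--     # counting sort over 128 ASCII buckets instead of comparison sort
--     if len(N) == 1: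
--         return N
--     cnt = [0] * 128
--     zeros = 0
--     for ch in N:
--         if ch == '0':
--             zeros += 1
--         else:
--             cnt[ord(ch)] += 1
--     rest = ''.join(chr(c) * cnt[c] for c in range(128))
--     return rest[0] + '0' * zeros + rest[1:]
-- ===== Notes on version B (the rewrite author's own statement) =====
-- stated objective: faster
-- what changed: replaces A's remove-zeros + comparison sort + char-by-char string concatenation with a one-pass counting sort over 128 ASCII buckets joined bucket by bucket
import Mathlib
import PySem

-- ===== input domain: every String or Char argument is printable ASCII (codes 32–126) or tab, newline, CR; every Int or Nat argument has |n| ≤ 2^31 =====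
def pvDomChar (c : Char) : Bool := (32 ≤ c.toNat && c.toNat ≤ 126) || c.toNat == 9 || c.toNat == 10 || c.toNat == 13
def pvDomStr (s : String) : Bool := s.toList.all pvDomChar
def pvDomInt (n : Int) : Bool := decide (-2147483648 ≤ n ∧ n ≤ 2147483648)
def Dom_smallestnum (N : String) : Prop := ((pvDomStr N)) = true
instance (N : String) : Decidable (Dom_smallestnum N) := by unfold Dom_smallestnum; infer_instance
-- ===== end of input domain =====

-- B replaces A's comparison sort and char-by-char string building by a counting sort over 128 ASCII buckets.

-- ===== PORT A =====
def smallestnum (N : String) : String :=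
  let cs := N.toList
  if cs.length == 1 then N
  else
    -- for i in range(0, len(N)): if N[i]=='0': c+=1 else: l.append(N[i])
    let lc := (PySem.List.pyRange 0 cs.length 1).foldl
      (fun (acc : List Char × Nat) i =>
        let ch := PySem.List.pyGetD cs i ' '
        if ch = '0' then (acc.1, acc.2 + 1) else (acc.1 ++ [ch], acc.2))
      ([], 0)
    let ls := PySem.List.sorted lc.1 (fun x => x) false
    match ls with
    | [] => ""   -- l[0] raises IndexError here; excluded by Pre_smallestnum
    | s0 :: _ =>
      let s : List Char := [s0] ++ List.replicate lc.2 '0'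
      let s := (PySem.List.pyRange 1 ls.length 1).foldl
        (fun acc i => acc ++ [PySem.List.pyGetD ls i ' ']) s
      String.ofList s

-- ===== PORT B =====
def smallestnum_alt (N : String) : String :=
  let cs := N.toList
  if cs.length == 1 then N
  else
    let cz := cs.foldl
      (fun (acc : List Nat × Nat) ch =>
        if ch = '0' then (acc.1, acc.2 + 1)
        else (PySem.List.pySetD acc.1 (ch.toNat : Int)
                (PySem.List.pyGetD acc.1 (ch.toNat : Int) 0 + 1), acc.2))
      (List.replicate 128 0, 0)
    let rest := (PySem.List.pyRange 0 128 1).flatMap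
      (fun c => List.replicate (PySem.List.pyGetD cz.1 c 0) (Char.ofNat c.toNat))
    match rest with
    | [] => ""   -- rest[0] raises IndexError here; excluded by Pre_smallestnum
    | r0 :: rt => String.ofList (r0 :: (List.replicate cz.2 '0' ++ rt))

-- ===== PRECONDITION & SPEC =====
-- Pre_ excludes exactly the inputs (empty or all-'0' strings of length ≠ 1) on which A (and B) raise IndexError.
def Pre_smallestnum (N : String) : Prop :=
  N.toList.length = 1 ∨ (N.toList.any (fun c => c ≠ '0')) = true
instance (N : String) : Decidable (Pre_smallestnum N) := by unfold Pre_smallestnum; infer_instance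
def pvWitness_smallestnum : String := "3102"
def Spec_smallestnum (N : String) (out : String) : Prop := out = smallestnum_alt N
instance (N : String) (out : String) : Decidable (Spec_smallestnum N out) := by unfold Spec_smallestnum; infer_instance

-- ===== CLAIM (what is proved, stated in full; the proofs are below) =====
def Claim_equal_smallestnum : Prop := ∀ (N : String), Dom_smallestnum N → Pre_smallestnum N → Spec_smallestnum N (smallestnum N)


-- ===== LEMMAS AND PROOFS =====

-- A's partition loop: collects the non-'0' chars and counts the '0's.
theorem pvAfold (cs : List Char) : ∀ (acc : List Char × Nat),
    cs.foldl (fun (acc : List Char × Nat) ch =>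
        if ch = '0' then (acc.1, acc.2 + 1) else (acc.1 ++ [ch], acc.2)) acc
      = (acc.1 ++ cs.filter (fun c => decide (c ≠ '0')), acc.2 + cs.count '0') := by
  induction cs with
  | nil => intro acc; simp
  | cons ch t ih =>
    intro acc
    by_cases h : ch = '0'
    · simp [h, ih, Nat.add_comm, Nat.add_left_comm]
    · simp [h, ih]

-- B's counting loop splits the same way: buckets fed by the non-'0' chars, zeros counted.
theorem pvBfold (cs : List Char) : ∀ (acc : List Nat × Nat),
    cs.foldl (fun (acc : List Nat × Nat) ch =>
        if ch = '0' then (acc.1, acc.2 + 1)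
        else (PySem.List.pySetD acc.1 (ch.toNat : Int)
                (PySem.List.pyGetD acc.1 (ch.toNat : Int) 0 + 1), acc.2)) acc
      = ((cs.filter (fun c => decide (c ≠ '0'))).foldl
           (fun cnt ch => cnt.set ch.toNat (cnt.getD ch.toNat 0 + 1)) acc.1,
         acc.2 + cs.count '0') := by
  induction cs with
  | nil => intro acc; simp
  | cons ch t ih =>
    intro acc
    by_cases h : ch = '0'
    · simp only [List.foldl_cons, if_pos h, ih]
      simp [h]
      omega
    · simp only [List.foldl_cons, if_neg h, ih]
      simp [h, PySem.List.pySetD_natCast, PySem.List.pyGetD_natCast]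

-- the bucket list after the fold holds the per-character counts
theorem pvCntGetD (l : List Char) : ∀ (cnt : List Nat) (c : Nat),
    (∀ ch ∈ l, ch.toNat < cnt.length) → c < cnt.length →
    (l.foldl (fun cnt ch => cnt.set ch.toNat (cnt.getD ch.toNat 0 + 1)) cnt).getD c 0
      = cnt.getD c 0 + l.countP (fun ch => ch.toNat == c) := by
  induction l with
  | nil => intro cnt c _ _; simp
  | cons ch t ih =>
    intro cnt c hl hc
    have hch : ch.toNat < cnt.length := hl ch (List.mem_cons_self ..)
    simp only [List.foldl_cons]
    rw [ih _ c (by intro x hx; simpa using hl x (List.mem_cons_of_mem _ hx))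
        (by simpa using hc)]
    by_cases h : ch.toNat = c
    · subst h
      rw [List.getD_eq_getElem?_getD, List.getElem?_set_self hch]
      simp [List.getD_eq_getElem?_getD, Nat.add_comm, Nat.add_assoc,
        Nat.add_left_comm]
    · rw [List.getD_eq_getElem?_getD, List.getElem?_set_ne h]
      simp [h, List.getD_eq_getElem?_getD]

theorem pvSumDelta (m : Nat → Nat) : ∀ (n t : Nat),
    ((List.range n).map (fun k => if t = k then m k else 0)).sum
      = if t < n then m t else 0 := by
  intro n
  induction n with
  | zero => intro t; simp
  | succ n ih =>
    intro t
    rw [List.range_succ]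
    simp only [List.map_append, List.sum_append, ih, List.map_cons, List.map_nil,
      List.sum_cons, List.sum_nil]
    by_cases h2 : t = n
    · subst h2; simp
    · by_cases h1 : t < n
      · have h3 : t < n + 1 := by omega
        simp [h1, h2, h3]
      · have h3 : ¬ t < n + 1 := by omega
        simp [h1, h2, h3]

theorem pvOfNatToNat (k : Nat) (h : k < 128) : (Char.ofNat k).toNat = k := by
  rw [Char.toNat_ofNat, if_pos]; constructor; omega

theorem pvRestCount (m : Nat → Nat) (a : Char) :
    ((List.range 128).flatMap (fun k => List.replicate (m k) (Char.ofNat k))).count a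
      = if a.toNat < 128 then m a.toNat else 0 := by
  rw [List.count_flatMap]
  have hmap : (List.range 128).map (List.count a ∘ fun k => List.replicate (m k) (Char.ofNat k))
      = (List.range 128).map (fun k => if a.toNat = k then m k else 0) := by
    apply List.map_congr_left
    intro k hk
    have hk' : k < 128 := List.mem_range.mp hk
    simp only [Function.comp_apply, List.count_replicate]
    by_cases h : a.toNat = k
    · have : Char.ofNat k = a := by rw [← h, Char.ofNat_toNat]
      simp [this, h]
    · have : ¬ (Char.ofNat k = a) := by
        intro he
        apply h
        rw [← he, pvOfNatToNat k hk']
      simp [this, h]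
  rw [hmap, pvSumDelta]

theorem pvCharLe (j k : Nat) (hj : j < 128) (hk : k < 128) (h : j ≤ k) :
    Char.ofNat j ≤ Char.ofNat k := by
  rw [Char.le_def, UInt32.le_iff_toNat_le]
  show (Char.ofNat j).toNat ≤ (Char.ofNat k).toNat
  rw [pvOfNatToNat j hj, pvOfNatToNat k hk]; exact h

theorem pvRestPairwise (m : Nat → Nat) : ∀ (n : Nat), n ≤ 128 →
    ((List.range n).flatMap (fun k => List.replicate (m k) (Char.ofNat k))).Pairwise (· ≤ ·) := by
  intro n
  induction n with
  | zero => intro _; simp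
  | succ n ih =>
    intro hn
    rw [List.range_succ, List.flatMap_append]
    rw [List.pairwise_append]
    refine ⟨ih (by omega), by simp [List.pairwise_replicate], ?_⟩
    intro x hx y hy
    rcases List.mem_flatMap.mp hx with ⟨k, hk, hxk⟩
    have hk' : k < n := List.mem_range.mp hk
    rcases List.mem_replicate.mp hxk with ⟨-, rfl⟩
    simp only [List.flatMap_cons, List.flatMap_nil, List.append_nil] at hy
    rcases List.mem_replicate.mp hy with ⟨-, rfl⟩
    exact pvCharLe k n (by omega) (by omega) (by omega)

-- counting sort: the concatenated buckets are a sorted rearrangement of the counted list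
theorem pvCountingSort (l : List Char) (hl : ∀ ch ∈ l, ch.toNat < 128) :
    (PySem.List.sorted l (fun x => x) false)
      = (List.range 128).flatMap
          (fun k => List.replicate (l.countP (fun ch => ch.toNat == k)) (Char.ofNat k)) := by
  apply PySem.List.sorted_id_eq_of_perm_of_pairwise
  · rw [List.perm_iff_count]
    intro a
    rw [pvRestCount]
    by_cases h : a.toNat < 128
    · rw [if_pos h, List.count_eq_countP]
      apply List.countP_congr
      intro x hx
      by_cases hxa : x = a
      · simp [hxa]
      · have hne : x.toNat ≠ a.toNat := fun he => hxa (Char.ext (UInt32.toNat_inj.mp he))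
        simp [hxa, hne]
    · rw [if_neg h, Eq.comm, List.count_eq_zero]
      intro hmem
      exact h (by simpa using hl a hmem)
  · exact pvRestPairwise _ 128 (le_refl _)

theorem pvFoldlApp (l : List Char) : ∀ (s : List Char),
    l.foldl (fun acc x => acc ++ [x]) s = s ++ l := by
  induction l with
  | nil => intro s; simp
  | cons x t ih => intro s; simp [ih]


theorem pvFlatMapCongr {α β : Type} (l : List α) (f g : α → List β)
    (h : ∀ x ∈ l, f x = g x) : l.flatMap f = l.flatMap g := by
  induction l with
  | nil => rfl
  | cons x t ih =>
    simp only [List.flatMap_cons]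
    rw [h x (List.mem_cons_self ..), ih (fun y hy => h y (List.mem_cons_of_mem _ hy))]

-- B's bucket concatenation IS sorted(l) for a list l of chars below code 128
theorem pvRestEq (l : List Char) (hl : ∀ ch ∈ l, ch.toNat < 128) :
    (PySem.List.pyRange 0 128 1).flatMap
        (fun c => List.replicate
          (PySem.List.pyGetD
            (l.foldl (fun cnt ch => cnt.set ch.toNat (cnt.getD ch.toNat 0 + 1))
              (List.replicate 128 0)) c 0)
          (Char.ofNat c.toNat))
      = PySem.List.sorted l (fun x => x) false := by
  rw [pvCountingSort l hl]
  rw [PySem.List.pyRange_one]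
  have h128 : ((128 : Int) - 0).toNat = 128 := by decide
  rw [h128, List.flatMap_map]
  apply pvFlatMapCongr
  intro k hk
  have hk' : k < 128 := List.mem_range.mp hk
  have hlen : ∀ ch ∈ l, ch.toNat < (List.replicate 128 (0 : Nat)).length := by
    intro ch hch; simpa using hl ch hch
  have : ((0 : Int) + (k : Int)) = ((k : Nat) : Int) := by omega
  rw [this, PySem.List.pyGetD_natCast, pvCntGetD l _ k hlen (by simpa using hk'),
    List.getD_replicate _ hk']
  simp

-- ===== VERDICT (by name: the statement is the Claim_ definition above) =====
theorem smallestnum_spec : Claim_equal_smallestnum := by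
  intro N hdom hpre
  unfold Spec_smallestnum smallestnum smallestnum_alt
  by_cases h1 : N.toList.length = 1
  · simp [h1]
  · have hb : (N.toList.length == 1) = false := by
      simp only [beq_eq_false_iff_ne, ne_eq]; exact h1
    simp only [hb, Bool.false_eq_true, if_false]
    rw [PySem.List.foldl_pyRange_zero_pyGetD' N.toList ' '
      (fun (acc : List Char × Nat) ch =>
        if ch = '0' then (acc.1, acc.2 + 1) else (acc.1 ++ [ch], acc.2)) ([], 0)]
    rw [pvAfold, pvBfold]
    simp only [List.nil_append, Nat.zero_add]
    have hchars : ∀ ch ∈ N.toList, ch.toNat < 128 := by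
      intro ch hch
      have hall := List.all_eq_true.mp hdom ch hch
      simp only [pvDomChar, Bool.or_eq_true, Bool.and_eq_true, decide_eq_true_eq,
        beq_iff_eq] at hall
      omega
    have hfl : ∀ ch ∈ N.toList.filter (fun c => decide (c ≠ '0')), ch.toNat < 128 :=
      fun ch hch => hchars ch (List.mem_of_mem_filter hch)
    rw [pvRestEq _ hfl]
    rcases h2 : PySem.List.sorted (N.toList.filter (fun c => decide (c ≠ '0')))
        (fun x => x) false with - | ⟨s0, tail⟩
    · exfalso
      have hnil : N.toList.filter (fun c => decide (c ≠ '0')) = [] :=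
        (PySem.List.sorted_eq_nil_iff _ _ _).mp h2
      rcases hpre with hp | hp
      · exact h1 hp
      · rcases List.any_eq_true.mp hp with ⟨c, hc, hcz⟩
        have := (List.filter_eq_nil_iff.mp hnil) c hc
        simp at hcz this
        exact hcz this
    · dsimp only
      rw [PySem.List.foldl_pyRange_pyGetD' (s0 :: tail) ' '
        (fun (acc : List Char) ch => acc ++ [ch]) _ (by norm_num : (0 : Int) ≤ 1)]
      rw [pvFoldlApp]
      simp
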